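-- pv_equiv track=rewrite | github.com/OpenFabrics/sunfish_library_reference | sunfish/events/redfish_subscription_handler.py | validate_subscription
-- ===== SOURCE A (Python) =====
-- def validate_subscription(payload: dict):
--     check = True
--     # check RegistryPrefixes and ExcludeRegistryPrefixes
--     if "RegistryPrefixes" in payload:
--         for prefix in payload["RegistryPrefixes"]:
--             if "ExcludeRegistryPrefixes" in payload:
--                 for exclude_pref in payload["ExcludeRegistryPrefixes"]:
--                     if prefix == exclude_pref:
--                         check = False
--     # check MessageIds and ExcludeMessageIds
--     if "MessageIds" in payload:
--         for msg_id in payload["MessageIds"]: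
--             if "ExcludeMessageIds" in payload:
--                 for exclude_msg in payload["ExcludeMessageIds"]:
--                     if msg_id == exclude_msg:
--                         check = False
--
--     # check ExcludeRegistryPrefixes and MessageIds
--     if "ExcludeRegistryPrefixes" in payload:
--         for exclude_pref in payload["ExcludeRegistryPrefixes"]:
--             if "MessageIds" in payload:
--                 for msg_id in payload["MessageIds"]:
--                     msg_id = msg_id.split('.')[0]
--                     if msg_id == exclude_pref:
--                         check = False
--     return check
-- ===== SOURCE B (Python) =====
-- def validate_subscription(payload: dict):
--     # Detect an overlap between two lists by sorting both and running a
--     # two-pointer merge scan; correct because after sorting, a common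
--     # element must be met when the smaller pointer is advanced.
--     def overlap(xs, ys):
--         xs = sorted(xs)
--         ys = sorted(ys)
--         i = j = 0
--         while i < len(xs) and j < len(ys):
--             if xs[i] == ys[j]:
--                 return True
--             if xs[i] < ys[j]:
--                 i += 1
--             else:
--                 j += 1
--         return False
--
--     if "RegistryPrefixes" in payload and "ExcludeRegistryPrefixes" in payload:
--         if overlap(payload["RegistryPrefixes"], payload["ExcludeRegistryPrefixes"]):
--             return False
--     if "MessageIds" in payload and "ExcludeMessageIds" in payload:
--         if overlap(payload["MessageIds"], payload["ExcludeMessageIds"]):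
--             return False
--     if "ExcludeRegistryPrefixes" in payload and "MessageIds" in payload:
--         if overlap([m.split('.')[0] for m in payload["MessageIds"]],
--                    payload["ExcludeRegistryPrefixes"]):
--             return False
--     return True
-- ===== Notes on version B (the rewrite author's own statement) =====
-- stated objective: alternative
-- what changed: B detects each forbidden overlap by sorting both lists and running a two-pointer merge scan (returning False on the first common element), instead of A's three nested flag-carrying scans over unsorted lists.
import Mathlib
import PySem

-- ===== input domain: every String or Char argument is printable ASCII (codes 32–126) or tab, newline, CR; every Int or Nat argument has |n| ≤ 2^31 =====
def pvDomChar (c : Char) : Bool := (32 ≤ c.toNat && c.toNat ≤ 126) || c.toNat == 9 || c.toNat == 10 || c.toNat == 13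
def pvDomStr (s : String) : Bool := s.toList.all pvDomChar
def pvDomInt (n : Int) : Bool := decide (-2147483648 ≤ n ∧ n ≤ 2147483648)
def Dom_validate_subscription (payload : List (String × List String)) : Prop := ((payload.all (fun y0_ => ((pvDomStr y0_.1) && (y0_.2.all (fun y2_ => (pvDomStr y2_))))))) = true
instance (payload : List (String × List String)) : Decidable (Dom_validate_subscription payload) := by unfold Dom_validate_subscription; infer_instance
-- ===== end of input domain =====

-- B replaces A's three nested flag-carrying scans by a sort-then-two-pointer-merge
-- overlap test per pair of lists (objective: alternative algorithm).
-- payload is a Python dict: association list, lookup = first match.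

-- shared dict-lookup primitive: payload.get(k) / "k in payload"
def vsGet? (payload : List (String × List String)) (k : String) : Option (List String) :=
  (payload.find? (fun kv => kv.1 == k)).map (·.2)

-- msg_id.split('.')[0]  (split('.') is never empty, so [0] never raises; headD is exact)
def vsHead (m : String) : String := (((PySem.Str.split? m ".").getD []).headD "")

-- ===== PORT A =====
def validate_subscription (payload : List (String × List String)) : Bool :=
  let check := true
  let check :=
    match vsGet? payload "RegistryPrefixes" with
    | none => check
    | some regs =>
      regs.foldl (fun check pfx =>
        match vsGet? payload "ExcludeRegistryPrefixes" with
        | none => check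
        | some exps => exps.foldl (fun check ex => if pfx == ex then false else check) check) check
  let check :=
    match vsGet? payload "MessageIds" with
    | none => check
    | some msgs =>
      msgs.foldl (fun check m =>
        match vsGet? payload "ExcludeMessageIds" with
        | none => check
        | some exms => exms.foldl (fun check ex => if m == ex then false else check) check) check
  let check :=
    match vsGet? payload "ExcludeRegistryPrefixes" with
    | none => check
    | some exps =>
      exps.foldl (fun check ex =>
        match vsGet? payload "MessageIds" with
        | none => check
        | some msgs => msgs.foldl (fun check m => if vsHead m == ex then false else check) check) check
  check

-- ===== PORT B =====
-- inner while loop of Source B's overlap: two-pointer merge scan over two sorted lists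
def vsMerge : List String → List String → Bool
  | x :: xt, y :: yt =>
    if x == y then true
    else if x < y then vsMerge xt (y :: yt)
    else vsMerge (x :: xt) yt
  | _, _ => false

-- Source B's overlap(xs, ys): sort both, then merge-scan
def vsOverlap (xs ys : List String) : Bool :=
  vsMerge (PySem.List.sorted xs (fun x => x) false) (PySem.List.sorted ys (fun x => x) false)

def validate_subscription_alt (payload : List (String × List String)) : Bool :=
  if ((vsGet? payload "RegistryPrefixes").isSome && (vsGet? payload "ExcludeRegistryPrefixes").isSome)
      && vsOverlap ((vsGet? payload "RegistryPrefixes").getD []) ((vsGet? payload "ExcludeRegistryPrefixes").getD [])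
  then false
  else if ((vsGet? payload "MessageIds").isSome && (vsGet? payload "ExcludeMessageIds").isSome)
      && vsOverlap ((vsGet? payload "MessageIds").getD []) ((vsGet? payload "ExcludeMessageIds").getD [])
  then false
  else if ((vsGet? payload "ExcludeRegistryPrefixes").isSome && (vsGet? payload "MessageIds").isSome)
      && vsOverlap (((vsGet? payload "MessageIds").getD []).map vsHead) ((vsGet? payload "ExcludeRegistryPrefixes").getD [])
  then false
  else true

-- ===== PRECONDITION & SPEC =====
def Spec_validate_subscription (payload : List (String × List String)) (out : Bool) : Prop := out = validate_subscription_alt payload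
instance (payload : List (String × List String)) (out : Bool) : Decidable (Spec_validate_subscription payload out) := by unfold Spec_validate_subscription; infer_instance

-- ===== CLAIM (what is proved, stated in full; the proofs are below) =====
def Claim_equal_validate_subscription : Prop := ∀ (payload : List (String × List String)), Dom_validate_subscription payload → Spec_validate_subscription payload (validate_subscription payload)

-- ===== LEMMAS AND PROOFS =====
theorem foldl_flag {α : Type} (l : List α) (g : α → Bool) (c : Bool) :
    l.foldl (fun c x => if g x then false else c) c = (c && !(l.any g)) := by
  induction l generalizing c with
  | nil => simp
  | cons x t ih =>
    cases h : g x <;> simp only [List.foldl, h, if_true, ih, List.any_cons, Bool.not_or,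
      Bool.not_true, Bool.and_false, Bool.false_and] <;> cases c <;> rfl

theorem foldl_andnot {α : Type} (l : List α) (g : α → Bool) (c : Bool) :
    l.foldl (fun c x => c && !(g x)) c = (c && !(l.any g)) := by
  induction l generalizing c with
  | nil => simp
  | cons x t ih => simp only [List.foldl, ih, List.any_cons, Bool.not_or, Bool.and_assoc]

-- Source B's early-return if-chain as a boolean formula
theorem ite_chain (a b c : Bool) :
    (if a = true then false else if b = true then false else if c = true then false else true)
      = (!a && (!b && !c)) := by
  cases a <;> cases b <;> cases c <;> simp

-- the merge scan on sorted lists finds exactly the common elements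
theorem vsMerge_iff (xs ys : List String) :
    xs.Pairwise (· ≤ ·) → ys.Pairwise (· ≤ ·) →
    (vsMerge xs ys = true ↔ ∃ z, z ∈ xs ∧ z ∈ ys) := by
  fun_induction vsMerge xs ys with
  | case1 x xt y yt heq =>
    intro _ _
    simp only [true_iff]
    exact ⟨x, List.mem_cons_self, by rw [eq_of_beq heq]; exact List.mem_cons_self⟩
  | case2 x xt y yt hne hlt ih =>
    intro hx hy
    have hxy : x ≠ y := by simpa using hne
    rw [ih (List.Pairwise.of_cons hx) hy]
    constructor
    · rintro ⟨z, hz1, hz2⟩; exact ⟨z, List.mem_cons_of_mem _ hz1, hz2⟩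
    · rintro ⟨z, hz1, hz2⟩
      rcases List.mem_cons.1 hz1 with rfl | hz1'
      · exfalso
        rcases List.mem_cons.1 hz2 with rfl | hz2'
        · exact hxy rfl
        · have hzy : y ≤ z := (List.pairwise_cons.1 hy).1 z hz2'
          exact absurd (lt_of_lt_of_le hlt hzy) (lt_irrefl z)
      · exact ⟨z, hz1', hz2⟩
  | case3 x xt y yt hne hnlt ih =>
    intro hx hy
    have hxy : x ≠ y := by simpa using hne
    have hyx : y < x := lt_of_le_of_ne (not_lt.1 hnlt) (fun h => hxy h.symm)
    rw [ih hx (List.Pairwise.of_cons hy)]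
    constructor
    · rintro ⟨z, hz1, hz2⟩; exact ⟨z, hz1, List.mem_cons_of_mem _ hz2⟩
    · rintro ⟨z, hz1, hz2⟩
      rcases List.mem_cons.1 hz2 with rfl | hz2'
      · exfalso
        rcases List.mem_cons.1 hz1 with rfl | hz1'
        · exact absurd hyx (lt_irrefl z)
        · have hzx : x ≤ z := (List.pairwise_cons.1 hx).1 z hz1'
          exact absurd (lt_of_lt_of_le hyx hzx) (lt_irrefl z)
      · exact ⟨z, hz1, hz2'⟩
  | case4 xs ys h =>
    intro _ _
    simp only [Bool.false_eq_true, false_iff]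
    rintro ⟨z, hz1, hz2⟩
    cases xs with
    | nil => simp at hz1
    | cons a b =>
      cases ys with
      | nil => simp at hz2
      | cons c d => exact h a b c d rfl rfl

theorem vsOverlap_eq_any (xs ys : List String) :
    vsOverlap xs ys = xs.any (fun p => ys.any (fun q => p == q)) := by
  rw [Bool.eq_iff_iff]
  unfold vsOverlap
  rw [vsMerge_iff _ _ (PySem.List.sorted_pairwise xs (fun x => x)) (PySem.List.sorted_pairwise ys (fun x => x))]
  simp only [PySem.List.mem_sorted, List.any_eq_true, beq_iff_eq]
  constructor
  · rintro ⟨z, h1, h2⟩; exact ⟨z, h1, z, h2, rfl⟩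
  · rintro ⟨x, h1, y, h2, rfl⟩; exact ⟨x, h1, h2⟩

-- ===== VERDICT (by name: the statement is the Claim_ definition above) =====
theorem validate_subscription_spec : Claim_equal_validate_subscription := by
  intro payload _
  unfold Spec_validate_subscription validate_subscription validate_subscription_alt
  rw [ite_chain]
  rcases hR : vsGet? payload "RegistryPrefixes" with _ | regs <;>
    rcases hE : vsGet? payload "ExcludeRegistryPrefixes" with _ | exps <;>
      rcases hM : vsGet? payload "MessageIds" with _ | msgs <;>
        rcases hEM : vsGet? payload "ExcludeMessageIds" with _ | exms <;>
          simp only [hR, hE, hM, hEM, Option.getD, Option.isSome, foldl_flag, foldl_andnot,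
            vsOverlap_eq_any, List.any_map, Function.comp_def, Bool.true_and, Bool.false_and,
            Bool.and_false, Bool.and_true, Bool.not_true, Bool.not_false, Bool.and_assoc] <;>
        first
          | rfl
          | (rw [Bool.eq_iff_iff]
             simp only [Bool.and_eq_true, Bool.not_eq_true', List.any_eq_false, List.any_eq_true,
               beq_iff_eq, Bool.not_eq_true]
             constructor <;> intro h <;> first | tauto | aesop)
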